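-- pv_equiv track=rewrite | github.com/OscarBrunelle/projects | games/guess_game_resolver.py | near_max
-- ===== SOURCE A (Python) =====
-- def near_max(n,prob_list,x):
--     x2=n
--     for number in prob_list:
--         x1=number-x
--         if x1 <0:
--             return n
--         else:
--             if x1<x2:
--                 x2=x1
--     return x2
-- ===== SOURCE B (Python) =====
-- def near_max(n, prob_list, x):
--     if any(number - x < 0 for number in prob_list):
--         return n
--     return min([n] + [number - x for number in prob_list])
-- ===== Notes on version B (the rewrite author's own statement) =====
-- stated objective: simpler
-- what changed: Replaces the single early-return loop with accumulator x2 by a guard pass (any difference negative -> n) plus a seeded min over the list of differences; correct because the result is order-independent.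
import Mathlib
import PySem

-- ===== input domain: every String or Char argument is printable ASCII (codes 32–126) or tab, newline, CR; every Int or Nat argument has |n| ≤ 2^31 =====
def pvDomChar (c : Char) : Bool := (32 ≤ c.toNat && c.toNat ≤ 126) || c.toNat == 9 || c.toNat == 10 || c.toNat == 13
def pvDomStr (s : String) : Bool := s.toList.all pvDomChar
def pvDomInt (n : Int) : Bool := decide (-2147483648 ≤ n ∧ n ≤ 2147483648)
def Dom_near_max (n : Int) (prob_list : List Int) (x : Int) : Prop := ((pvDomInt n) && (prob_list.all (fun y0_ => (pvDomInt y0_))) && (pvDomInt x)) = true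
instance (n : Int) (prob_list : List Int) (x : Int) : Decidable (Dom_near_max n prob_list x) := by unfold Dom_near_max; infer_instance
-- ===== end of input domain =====

-- B replaces A's early-return loop with accumulator by an any-guard plus a min over the differences seeded with n (simpler; same O(n) cost).

-- ===== PORT A =====
-- the for-loop with early return, state x2
def near_max_loop (n x : Int) : List Int → Int → Int
  | [], x2 => x2
  | number :: rest, x2 =>
    let x1 := number - x
    if x1 < 0 then n
    else if x1 < x2 then near_max_loop n x rest x1
    else near_max_loop n x rest x2

def near_max (n : Int) (prob_list : List Int) (x : Int) : Int :=
  near_max_loop n x prob_list n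

-- ===== PORT B =====
def near_max_alt (n : Int) (prob_list : List Int) (x : Int) : Int :=
  if prob_list.any (fun number => number - x < 0) then n
  else ((prob_list.map (fun number => number - x)).foldl min n)

-- ===== PRECONDITION & SPEC =====
def Spec_near_max (n : Int) (prob_list : List Int) (x : Int) (out : Int) : Prop := out = near_max_alt n prob_list x
instance (n : Int) (prob_list : List Int) (x : Int) (out : Int) : Decidable (Spec_near_max n prob_list x out) := by unfold Spec_near_max; infer_instance

-- ===== CLAIM (what is proved, stated in full; the proofs are below) =====
def Claim_equal_near_max : Prop := ∀ (n : Int) (prob_list : List Int) (x : Int), Dom_near_max n prob_list x → Spec_near_max n prob_list x (near_max n prob_list x)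

-- ===== LEMMAS AND PROOFS =====
theorem near_max_loop_eq (n x : Int) (l : List Int) : ∀ x2 : Int,
    near_max_loop n x l x2 =
      if l.any (fun number => number - x < 0) then n
      else ((l.map (fun number => number - x)).foldl min x2) := by
  induction l with
  | nil => intro x2; simp [near_max_loop]
  | cons number rest ih =>
    intro x2
    simp only [near_max_loop, List.any_cons, List.map_cons, List.foldl_cons]
    by_cases h1 : number - x < 0
    · simp [h1]
    · have hmin : min x2 (number - x) = if number - x < x2 then number - x else x2 := by
        rw [min_def]; split_ifs <;> omega
      by_cases h2 : number - x < x2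
      · simp [h1, h2, ih, hmin]
      · simp [h1, h2, ih, hmin]

-- ===== VERDICT (by name: the statement is the Claim_ definition above) =====
theorem near_max_spec : Claim_equal_near_max := by
  intro n prob_list x _
  unfold Spec_near_max near_max near_max_alt
  exact near_max_loop_eq n x prob_list n
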